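-- pv_equiv track=rewrite | github.com/manitsrik/SenaNetworkMonitorV0 | discovery.py | guess_monitor_type
-- ===== SOURCE A (Python) =====
-- def guess_monitor_type(open_ports):
--     """Suggest the best monitor type based on open ports"""
--     port_numbers = {p['port'] for p in open_ports}
--
--     if 161 in port_numbers:
--         return 'snmp'
--     if 443 in port_numbers:
--         return 'http'
--     if 80 in port_numbers:
--         return 'http'
--     return 'ping'
-- ===== SOURCE B (Python) =====
-- def guess_monitor_type(open_ports):
--     """Suggest the best monitor type based on open ports"""
--     table = [161, 443, 80]
--     types = ['snmp', 'http', 'http']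
--     best = len(table)
--     for p in open_ports:
--         port = p['port']
--         if port in table:
--             i = table.index(port)
--             if i < best:
--                 best = i
--     return types[best] if best < len(table) else 'ping'
-- ===== Notes on version B (the rewrite author's own statement) =====
-- stated objective: alternative
-- what changed: Replaced the set-comprehension plus cascaded membership ifs by a single pass over open_ports that keeps the smallest index matched in an ordered priority table [(161,snmp),(443,http),(80,http)] and returns the corresponding type (or 'ping').
import Mathlib
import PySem

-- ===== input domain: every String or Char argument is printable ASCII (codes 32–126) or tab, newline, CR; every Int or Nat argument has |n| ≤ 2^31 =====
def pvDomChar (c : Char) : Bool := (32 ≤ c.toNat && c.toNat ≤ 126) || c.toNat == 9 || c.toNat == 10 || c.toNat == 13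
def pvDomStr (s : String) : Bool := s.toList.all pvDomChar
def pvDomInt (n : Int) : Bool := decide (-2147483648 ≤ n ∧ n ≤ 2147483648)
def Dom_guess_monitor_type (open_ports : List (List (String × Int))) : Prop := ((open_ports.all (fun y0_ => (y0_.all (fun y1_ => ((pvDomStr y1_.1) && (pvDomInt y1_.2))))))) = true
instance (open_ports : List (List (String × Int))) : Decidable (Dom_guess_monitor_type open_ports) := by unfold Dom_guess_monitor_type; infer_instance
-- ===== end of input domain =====

-- B replaces A's set-comprehension + cascaded ifs by one pass keeping the best index in an ordered priority table (alternative decomposition, same cost).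

-- ===== PORT A =====
-- {p['port'] for p in open_ports}; p['port'] is Dict.get? (none would be a KeyError, excluded by Pre_)
def guess_monitor_type (open_ports : List (List (String × Int))) : String :=
  let port_numbers : PySem.Set (Option Int) :=
    PySem.Set.ofList (open_ports.map (fun p => PySem.Dict.get? (PySem.Dict.mk p) "port"))
  if PySem.Set.contains port_numbers (some 161) then "snmp"
  else if PySem.Set.contains port_numbers (some 443) then "http"
  else if PySem.Set.contains port_numbers (some 80) then "http"
  else "ping"

-- ===== PORT B =====
def gmtStep (b : Nat) (p : List (String × Int)) : Nat :=
  -- port = p['port']; if port in table: i = table.index(port); if i < best: best = i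
  match PySem.List.index? [some (161:Int), some 443, some 80] (PySem.Dict.get? (PySem.Dict.mk p) "port") with
  | some i => if i < b then i else b
  | none => b

def guess_monitor_type_alt (open_ports : List (List (String × Int))) : String :=
  let best := open_ports.foldl gmtStep 3
  if best < 3 then (["snmp", "http", "http"] : List String).getD best "ping" else "ping"

-- ===== PRECONDITION & SPEC =====
-- Pre_ excludes exactly the inputs where Python A raises KeyError: a dict without a 'port' key.
def Pre_guess_monitor_type (open_ports : List (List (String × Int))) : Prop :=
  (open_ports.all (fun p => (PySem.Dict.get? (PySem.Dict.mk p) "port").isSome)) = true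
instance (open_ports : List (List (String × Int))) : Decidable (Pre_guess_monitor_type open_ports) := by
  unfold Pre_guess_monitor_type; infer_instance
def pvWitness_guess_monitor_type : (List (List (String × Int))) := [[("port", 80)], [("port", 22)]]

def Spec_guess_monitor_type (open_ports : List (List (String × Int))) (out : String) : Prop := out = guess_monitor_type_alt open_ports
instance (open_ports : List (List (String × Int))) (out : String) : Decidable (Spec_guess_monitor_type open_ports out) := by unfold Spec_guess_monitor_type; infer_instance

-- ===== CLAIM (what is proved, stated in full; the proofs are below) =====
def Claim_equal_guess_monitor_type : Prop := ∀ (open_ports : List (List (String × Int))), Dom_guess_monitor_type open_ports → Pre_guess_monitor_type open_ports → Spec_guess_monitor_type open_ports (guess_monitor_type open_ports)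

-- ===== LEMMAS AND PROOFS =====

-- "index of o in the table", 4 when absent (4 > 3 so it can never win against the start value under k ≤ 3)
def gmtIdx (o : Option Int) : Nat :=
  if o = some 161 then 0 else if o = some 443 then 1 else if o = some 80 then 2 else 4

theorem gmtStep_le_iff (b k : Nat) (p : List (String × Int)) (hk : k ≤ 3) :
    gmtStep b p ≤ k ↔ b ≤ k ∨ gmtIdx (PySem.Dict.get? (PySem.Dict.mk p) "port") ≤ k := by
  unfold gmtStep gmtIdx
  generalize PySem.Dict.get? (PySem.Dict.mk p) "port" = o
  by_cases h1 : o = some 161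
  · subst h1
    rw [PySem.List.index?, show List.idxOf? (some (161:Int)) [some 161, some 443, some 80] = some 0 from by decide]
    simp; split_ifs <;> omega
  · by_cases h2 : o = some 443
    · subst h2
      rw [PySem.List.index?, show List.idxOf? (some (443:Int)) [some 161, some 443, some 80] = some 1 from by decide]
      simp; split_ifs <;> omega
    · by_cases h3 : o = some 80
      · subst h3
        rw [PySem.List.index?, show List.idxOf? (some (80:Int)) [some 161, some 443, some 80] = some 2 from by decide]
        simp; split_ifs <;> omega
      · have hn : List.idxOf? o [some (161:Int), some 443, some 80] = none := by
          rw [List.idxOf?_eq_none_iff]; simp [h1, h2, h3]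
        rw [PySem.List.index?, hn]
        simp [h1, h2, h3]; omega

theorem gmtFold_le_iff (l : List (List (String × Int))) (b k : Nat) (hk : k ≤ 3) :
    l.foldl gmtStep b ≤ k ↔ b ≤ k ∨ ∃ p ∈ l, gmtIdx (PySem.Dict.get? (PySem.Dict.mk p) "port") ≤ k := by
  induction l generalizing b with
  | nil => simp
  | cons p l ih =>
      rw [List.foldl_cons, ih, gmtStep_le_iff b k p hk]
      constructor
      · rintro ((h | h) | ⟨q, hq, h⟩)
        · exact Or.inl h
        · exact Or.inr ⟨p, List.mem_cons_self, h⟩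
        · exact Or.inr ⟨q, List.mem_cons_of_mem p hq, h⟩
      · rintro (h | ⟨q, hq, h⟩)
        · exact Or.inl (Or.inl h)
        · rcases List.mem_cons.mp hq with rfl | hq
          · exact Or.inl (Or.inr h)
          · exact Or.inr ⟨q, hq, h⟩

theorem gmtIdx_eq_zero (o : Option Int) : gmtIdx o ≤ 0 ↔ o = some 161 := by
  unfold gmtIdx; split_ifs <;> simp_all

theorem gmtIdx_le_two (o : Option Int) :
    gmtIdx o ≤ 2 ↔ o = some 161 ∨ o = some 443 ∨ o = some 80 := by
  unfold gmtIdx; split_ifs <;> simp_all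

theorem guess_monitor_type_spec : Claim_equal_guess_monitor_type := by
  intro open_ports _ _
  unfold Spec_guess_monitor_type guess_monitor_type guess_monitor_type_alt
  have hle3 : open_ports.foldl gmtStep 3 ≤ 3 :=
    (gmtFold_le_iff open_ports 3 3 le_rfl).mpr (Or.inl le_rfl)
  by_cases h161 : ∃ p ∈ open_ports, PySem.Dict.get? (PySem.Dict.mk p) "port" = some 161
  · have h0 : open_ports.foldl gmtStep 3 ≤ 0 := by
      rw [gmtFold_le_iff open_ports 3 0 (by omega)]
      obtain ⟨p, hp, hv⟩ := h161
      exact Or.inr ⟨p, hp, (gmtIdx_eq_zero _).mpr hv⟩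
    simp [h161, Nat.le_zero.mp h0]
  · by_cases hht : (∃ p ∈ open_ports, PySem.Dict.get? (PySem.Dict.mk p) "port" = some 443) ∨
        (∃ p ∈ open_ports, PySem.Dict.get? (PySem.Dict.mk p) "port" = some 80)
    · have h2 : open_ports.foldl gmtStep 3 ≤ 2 := by
        rw [gmtFold_le_iff open_ports 3 2 (by omega)]
        rcases hht with ⟨p, hp, hv⟩ | ⟨p, hp, hv⟩ <;>
          exact Or.inr ⟨p, hp, (gmtIdx_le_two _).mpr (by simp [hv])⟩
      have h0 : ¬ open_ports.foldl gmtStep 3 ≤ 0 := by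
        rw [gmtFold_le_iff open_ports 3 0 (by omega)]
        rintro (h | ⟨p, hp, h⟩)
        · omega
        · exact h161 ⟨p, hp, (gmtIdx_eq_zero _).mp h⟩
      have h12 : open_ports.foldl gmtStep 3 = 1 ∨ open_ports.foldl gmtStep 3 = 2 := by omega
      rcases hht with h | h
      · rcases h12 with h12 | h12 <;> simp [h161, h, h12]
      · by_cases h443 : ∃ p ∈ open_ports, PySem.Dict.get? (PySem.Dict.mk p) "port" = some 443 <;>
          rcases h12 with h12 | h12 <;> simp [h161, h443, h, h12]
    · have e443 : ¬ ∃ p ∈ open_ports, PySem.Dict.get? (PySem.Dict.mk p) "port" = some 443 :=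
        fun h => hht (Or.inl h)
      have e80 : ¬ ∃ p ∈ open_ports, PySem.Dict.get? (PySem.Dict.mk p) "port" = some 80 :=
        fun h => hht (Or.inr h)
      have h2 : ¬ open_ports.foldl gmtStep 3 ≤ 2 := by
        rw [gmtFold_le_iff open_ports 3 2 (by omega)]
        rintro (h | ⟨p, hp, h⟩)
        · omega
        · rcases (gmtIdx_le_two _).mp h with hv | hv | hv
          · exact h161 ⟨p, hp, hv⟩
          · exact e443 ⟨p, hp, hv⟩
          · exact e80 ⟨p, hp, hv⟩
      have h3 : open_ports.foldl gmtStep 3 = 3 := by omega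
      simp [h161, e443, e80, h3]
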